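-- pv_equiv track=rewrite | github.com/mninadmnobo/Medrax_premium | medrax/agent/anatomical_consistency_graph.py | _infer_relation_type
-- ===== SOURCE A (Python) =====
-- from typing import List, Dict, Tuple, Optional, Any
--
-- def _infer_relation_type(measure1: str, measure2: str) -> Optional[str]:
--     """
--     Infer relation type between two measurements based on their names.
--
--     Works generically for any pathology measurement names.
--     """
--     m1_lower = measure1.lower()
--     m2_lower = measure2.lower()
--
--     # Volumetric relations
--     if any(vol in m1_lower for vol in ["volume", "area", "size"]) and \
--        any(vol in m2_lower for vol in ["volume", "area", "size"]):
--         return "volumetric"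
--
--     # Density relations
--     if any(dens in m1_lower for dens in ["density", "intensity", "attenuation"]) and \
--        any(dens in m2_lower for dens in ["density", "intensity", "attenuation"]):
--         return "density"
--
--     # Thickness relations
--     if any(thick in m1_lower for thick in ["thickness", "width"]) and \
--        any(thick in m2_lower for thick in ["thickness", "width"]):
--         return "thickness"
--
--     # Extent relations (bilateral, spread, etc.)
--     if any(ext in m1_lower for ext in ["extent", "bilateral", "spread", "distribution"]) or \
--        any(ext in m2_lower for ext in ["extent", "bilateral", "spread", "distribution"]):
--         return "extent"
--
--     # Spatial relations (position, location)
--     if any(sp in m1_lower for sp in ["position", "location", "side"]) or \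
--        any(sp in m2_lower for sp in ["position", "location", "side"]):
--         return "spatial"
--
--     return None
-- ===== SOURCE B (Python) =====
-- from typing import Optional
--
-- # Each keyword maps to one category bit; labels indexed by category.
-- _KEYWORD_CAT = {
--     "volume": 0, "area": 0, "size": 0,
--     "density": 1, "intensity": 1, "attenuation": 1,
--     "thickness": 2, "width": 2,
--     "extent": 3, "bilateral": 3, "spread": 3, "distribution": 3,
--     "position": 4, "location": 4, "side": 4,
-- }
-- _LABELS = ["volumetric", "density", "thickness", "extent", "spatial"]
--
-- def _mask(s: str) -> int:
--     """Bitmask of categories whose keywords occur in s (case-insensitive)."""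
--     sl = s.lower()
--     m = 0
--     for kw, cat in _KEYWORD_CAT.items():
--         if kw in sl:
--             m |= 1 << cat
--     return m
--
-- def _infer_relation_type(measure1: str, measure2: str) -> Optional[str]:
--     a, b = _mask(measure1), _mask(measure2)
--     both, either = a & b, a | b
--     # first three categories need a hit in BOTH names, last two in EITHER
--     for cat in range(3):
--         if (both >> cat) & 1:
--             return _LABELS[cat]
--     for cat in (3, 4):
--         if (either >> cat) & 1:
--             return _LABELS[cat]
--     return None
-- ===== Notes on version B (the rewrite author's own statement) =====
-- stated objective: alternative
-- what changed: B classifies each name independently into a category bitmask via one keyword->category map pass, then derives the answer purely from bit arithmetic on the two masks (AND for the both-required categories, OR for the either categories), instead of A's five sequential paired substring-test blocks.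
import Mathlib
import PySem

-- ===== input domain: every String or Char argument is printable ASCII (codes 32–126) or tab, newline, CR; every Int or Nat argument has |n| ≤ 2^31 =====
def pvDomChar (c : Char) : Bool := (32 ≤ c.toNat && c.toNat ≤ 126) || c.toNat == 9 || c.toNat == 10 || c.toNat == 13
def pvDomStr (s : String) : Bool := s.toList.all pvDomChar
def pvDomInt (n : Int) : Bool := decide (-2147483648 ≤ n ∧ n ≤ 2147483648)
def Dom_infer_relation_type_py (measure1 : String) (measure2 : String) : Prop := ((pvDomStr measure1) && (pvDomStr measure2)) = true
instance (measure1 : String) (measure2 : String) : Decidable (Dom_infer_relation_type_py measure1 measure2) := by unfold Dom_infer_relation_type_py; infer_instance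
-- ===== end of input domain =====

-- B classifies each name into a category bitmask in one keyword-map pass, then picks the label by bit arithmetic on the two masks (objective: alternative).


-- ===== PORT A =====
def infer_relation_type_py (measure1 : String) (measure2 : String) : Option String :=
  let m1_lower := PySem.Str.lower measure1
  let m2_lower := PySem.Str.lower measure2
  if ["volume", "area", "size"].any (fun v => PySem.Str.isIn v m1_lower) &&
     ["volume", "area", "size"].any (fun v => PySem.Str.isIn v m2_lower) then
    some "volumetric"
  else if ["density", "intensity", "attenuation"].any (fun d => PySem.Str.isIn d m1_lower) &&
          ["density", "intensity", "attenuation"].any (fun d => PySem.Str.isIn d m2_lower) then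
    some "density"
  else if ["thickness", "width"].any (fun t => PySem.Str.isIn t m1_lower) &&
          ["thickness", "width"].any (fun t => PySem.Str.isIn t m2_lower) then
    some "thickness"
  else if ["extent", "bilateral", "spread", "distribution"].any (fun e => PySem.Str.isIn e m1_lower) ||
          ["extent", "bilateral", "spread", "distribution"].any (fun e => PySem.Str.isIn e m2_lower) then
    some "extent"
  else if ["position", "location", "side"].any (fun s => PySem.Str.isIn s m1_lower) ||
          ["position", "location", "side"].any (fun s => PySem.Str.isIn s m2_lower) then
    some "spatial"
  else
    none

-- ===== PORT B =====
-- the keyword -> category-bit map of Source B (_KEYWORD_CAT, in insertion order)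
def pvKwCat : List (String × Nat) :=
  [("volume", 0), ("area", 0), ("size", 0),
   ("density", 1), ("intensity", 1), ("attenuation", 1),
   ("thickness", 2), ("width", 2),
   ("extent", 3), ("bilateral", 3), ("spread", 3), ("distribution", 3),
   ("position", 4), ("location", 4), ("side", 4)]

def pvLabels : List String := ["volumetric", "density", "thickness", "extent", "spatial"]

-- Source B's _mask: fold the keyword map, OR-ing in 1 << cat for each keyword found in s.lower()
def pvMask (s : String) : Nat :=
  let sl := PySem.Str.lower s
  pvKwCat.foldl (fun m kc => if PySem.Str.isIn kc.1 sl then m ||| (1 <<< kc.2) else m) 0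

-- Source B's for-loops with early return: first category in cats whose bit is set in m
def pvLoopCats (m : Nat) : List Nat → Option Nat
  | [] => none
  | c :: rest => if ((m >>> c) &&& 1) == 1 then some c else pvLoopCats m rest

def infer_relation_type_py_alt (measure1 : String) (measure2 : String) : Option String :=
  let a := pvMask measure1
  let b := pvMask measure2
  let both := a &&& b
  let either := a ||| b
  match pvLoopCats both [0, 1, 2] with
  | some cat => PySem.List.pyGet? pvLabels (cat : Int)   -- _LABELS[cat]; cat < 5 so always some
  | none =>
    match pvLoopCats either [3, 4] with
    | some cat => PySem.List.pyGet? pvLabels (cat : Int)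
    | none => none

-- ===== PRECONDITION & SPEC =====
def Spec_infer_relation_type_py (measure1 : String) (measure2 : String) (out : Option String) : Prop := out = infer_relation_type_py_alt measure1 measure2
instance (measure1 : String) (measure2 : String) (out : Option String) : Decidable (Spec_infer_relation_type_py measure1 measure2 out) := by unfold Spec_infer_relation_type_py; infer_instance

-- ===== CLAIM =====
def Claim_equal_infer_relation_type_py : Prop := ∀ (measure1 : String) (measure2 : String), Dom_infer_relation_type_py measure1 measure2 → Spec_infer_relation_type_py measure1 measure2 (infer_relation_type_py measure1 measure2)

-- ===== LEMMAS AND PROOFS =====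

-- bridge: the port's bit test is Nat.testBit
theorem pvAnd1 (m c : Nat) : (((m >>> c) &&& 1) == 1) = Nat.testBit m c := by
  simp only [Nat.shiftRight_eq_div_pow, Nat.and_one_is_mod, Nat.testBit_eq_decide_div_mod_eq]
  by_cases h : m / 2 ^ c % 2 = 1 <;> simp [h]

theorem pvOrBit (m cat c : Nat) : Nat.testBit (m ||| (1 <<< cat)) c = (Nat.testBit m c || (cat == c)) := by
  by_cases h : cat = c <;> simp [h, Nat.testBit_or, Nat.one_shiftLeft]

-- bit c of Source B's fold = some keyword of category c occurs
theorem pvFoldBit (sl : String) (l : List (String × Nat)) (m : Nat) (c : Nat) :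
    Nat.testBit (l.foldl (fun m kc => if PySem.Str.isIn kc.1 sl then m ||| (1 <<< kc.2) else m) m) c
    = (Nat.testBit m c || l.any (fun kc => kc.2 == c && PySem.Str.isIn kc.1 sl)) := by
  induction l generalizing m with
  | nil => simp
  | cons kc rest ih =>
    simp only [List.foldl_cons, List.any_cons]
    by_cases h : PySem.Str.isIn kc.1 sl
    · rw [if_pos h, ih, pvOrBit]
      cases Nat.testBit m c <;> cases (kc.2 == c) <;> simp_all
    · rw [if_neg h, ih]
      simp_all

theorem pvMaskBit (s : String) (c : Nat) :
    Nat.testBit (pvMask s) c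
    = pvKwCat.any (fun kc => kc.2 == c && PySem.Str.isIn kc.1 (PySem.Str.lower s)) := by
  simp only [pvMask]
  rw [pvFoldBit]
  simp

-- ===== VERDICT =====
theorem infer_relation_type_py_spec : Claim_equal_infer_relation_type_py := by
  intro m1 m2 _
  unfold Spec_infer_relation_type_py infer_relation_type_py infer_relation_type_py_alt
  simp only [pvLoopCats, pvAnd1, Nat.testBit_and, Nat.testBit_or, pvMaskBit, pvKwCat,
    List.any_cons, List.any_nil, Bool.or_false, Bool.false_or, Bool.false_and,
    Bool.true_and, Nat.reduceBEq]
  generalize (PySem.Str.isIn "volume" (PySem.Str.lower m1) || (PySem.Str.isIn "area" (PySem.Str.lower m1) || PySem.Str.isIn "size" (PySem.Str.lower m1))) = B1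
  generalize (PySem.Str.isIn "density" (PySem.Str.lower m1) || (PySem.Str.isIn "intensity" (PySem.Str.lower m1) || PySem.Str.isIn "attenuation" (PySem.Str.lower m1))) = B2
  generalize (PySem.Str.isIn "thickness" (PySem.Str.lower m1) || PySem.Str.isIn "width" (PySem.Str.lower m1)) = B3
  generalize (PySem.Str.isIn "extent" (PySem.Str.lower m1) || (PySem.Str.isIn "bilateral" (PySem.Str.lower m1) || (PySem.Str.isIn "spread" (PySem.Str.lower m1) || PySem.Str.isIn "distribution" (PySem.Str.lower m1)))) = B4
  generalize (PySem.Str.isIn "position" (PySem.Str.lower m1) || (PySem.Str.isIn "location" (PySem.Str.lower m1) || PySem.Str.isIn "side" (PySem.Str.lower m1))) = B5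
  generalize (PySem.Str.isIn "volume" (PySem.Str.lower m2) || (PySem.Str.isIn "area" (PySem.Str.lower m2) || PySem.Str.isIn "size" (PySem.Str.lower m2))) = C1
  generalize (PySem.Str.isIn "density" (PySem.Str.lower m2) || (PySem.Str.isIn "intensity" (PySem.Str.lower m2) || PySem.Str.isIn "attenuation" (PySem.Str.lower m2))) = C2
  generalize (PySem.Str.isIn "thickness" (PySem.Str.lower m2) || PySem.Str.isIn "width" (PySem.Str.lower m2)) = C3
  generalize (PySem.Str.isIn "extent" (PySem.Str.lower m2) || (PySem.Str.isIn "bilateral" (PySem.Str.lower m2) || (PySem.Str.isIn "spread" (PySem.Str.lower m2) || PySem.Str.isIn "distribution" (PySem.Str.lower m2)))) = C4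
  generalize (PySem.Str.isIn "position" (PySem.Str.lower m2) || (PySem.Str.isIn "location" (PySem.Str.lower m2) || PySem.Str.isIn "side" (PySem.Str.lower m2))) = C5
  revert B1 B2 B3 B4 B5 C1 C2 C3 C4 C5
  decide
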